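-- pv_equiv track=rewrite | github.com/szolkiewicz/spd2023 | lab3/Johnson.py | JohnsonFLM
-- ===== SOURCE A (Python) =====
-- def JohnsonFLM(_J):     # Johnson, optymalny dla 2 maszyn, mozna zastosować dla wiekszej ilosci maszyn
--     n = len(_J)  # Liczba zadań
--     m = len(_J[0])  # Liczba maszyn
--     l = 0  # Indeks dla zadania wpiętego na początek listy pi
--     k = n - 1  # Indeks dla zadania wpiętego na koniec listy pi
--     N = list(range(n))  # Zbiór zadań do przetworzenia
--     pi = [0] * n  # Lista reprezentująca kolejność wykonywania zadań
--
--     while N: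
--         min_pij = float('inf')  # ustatwiamy na inf aby móc znaleźć najmniejszą
--         j_star, i_star = None, None  # Indeksy zadania i maszyny z najmniejszym czasem operacji
--         # Szukamy indeksów zadania o najmniejszym czasie operacji na maszynie #OFTOP egzamin z optymalizacji jest przeniesiony na godzine 13 brbrber
--         for j in N:
--             for i in range(m):
--                 if _J[j][i] < min_pij:
--                     min_pij = _J[j][i]
--                     j_star = j
--                     i_star = i
--         # Dodawanie zadania do listy pi w odpowiedniej kolejności
--         if _J[j_star][0] < _J[j_star][m - 1]:#bierzemy pod uwagę 1 i ostatnią maszynę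
--             pi[l] = j_star
--             l += 1
--         else:
--             pi[k] = j_star
--             k -= 1
--         N.remove(j_star)  # Usunięcie zadania z zbioru N
--     return pi
-- ===== SOURCE B (Python) =====
-- def JohnsonFLM(_J):
--     # Precompute each job's minimal operation time over the m machines once,
--     # stable-sort the jobs by it, then place each job at the front or the back
--     # depending on its time on the first vs the last machine.
--     m = len(_J[0])
--     order = sorted(range(len(_J)), key=lambda j: min(_J[j][:m]))
--     front, back = [], []
--     for j in order:
--         if _J[j][0] < _J[j][m - 1]:
--             front.append(j)
--         else:
--             back.append(j)
--     return front + back[::-1]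
-- ===== Notes on version B (the rewrite author's own statement) =====
-- stated objective: faster
-- what changed: A rescans all remaining jobs and machines inside a while-loop to find each next minimum (selection-sort style); B computes each job's row minimum once, stable-sorts the job indices by it, and places jobs front/back in a single pass.
import Mathlib
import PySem

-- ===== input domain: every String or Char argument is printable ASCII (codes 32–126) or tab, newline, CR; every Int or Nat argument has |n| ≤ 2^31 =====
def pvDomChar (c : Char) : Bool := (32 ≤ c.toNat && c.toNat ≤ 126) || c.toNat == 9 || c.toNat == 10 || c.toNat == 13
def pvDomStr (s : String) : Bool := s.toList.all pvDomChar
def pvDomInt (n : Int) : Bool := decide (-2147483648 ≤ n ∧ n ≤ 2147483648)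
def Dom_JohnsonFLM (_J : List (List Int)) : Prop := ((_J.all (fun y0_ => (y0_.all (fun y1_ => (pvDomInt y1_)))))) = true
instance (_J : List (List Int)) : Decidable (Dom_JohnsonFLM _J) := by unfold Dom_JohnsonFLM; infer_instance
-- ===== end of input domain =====

-- B replaces A's repeated full rescans of the remaining jobs by one per-job row-minimum
-- key, a single stable sort on it, and one front/back placement pass (objective: faster).

-- ===== PORT A =====
-- 'x < min_pij' where 'none' plays float('inf')
def pvLtInf (x : Int) (mp : Option Int) : Bool :=
  match mp with
  | none => true
  | some v => decide (x < v)

-- 'for j in N: for i in range(m): if _J[j][i] < min_pij: …'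
-- (the state is (min_pij, j_star); i_star is assigned but never read in A, so it is omitted)
def pvScanA (J : List (List Int)) (m : Nat) (N : List Int) : Option Int × Option Int :=
  N.foldl (fun st j =>
    (PySem.List.pyRange 0 (m : Int) 1).foldl (fun st2 i =>
      if pvLtInf (PySem.List.pyGetD (PySem.List.pyGetD J j []) i 0) st2.1 = true then
        (some (PySem.List.pyGetD (PySem.List.pyGetD J j []) i 0), some j)
      else st2) st) (none, none)

-- 'while N: …'; the fuel is |N|, one unit per removed job
def pvLoopA (J : List (List Int)) (m : Nat) :
    Nat → List Int → List Int → Int → Int → List Int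
  | 0, _, pi, _, _ => pi
  | fuel+1, N, pi, l, k =>
    if N = [] then pi
    else
      match (pvScanA J m N).2 with
      | none => pi     -- Python raises TypeError here (j_star is None); outside Pre_
      | some js =>
        if PySem.List.pyGetD (PySem.List.pyGetD J js []) 0 0 <
            PySem.List.pyGetD (PySem.List.pyGetD J js []) ((m : Int) - 1) 0 then
          pvLoopA J m fuel ((PySem.List.remove? N js).getD N) (PySem.List.pySetD pi l js) (l+1) k
        else
          pvLoopA J m fuel ((PySem.List.remove? N js).getD N) (PySem.List.pySetD pi k js) l (k-1)

def JohnsonFLM (_J : List (List Int)) : List Int :=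
  let n := _J.length
  let m := (PySem.List.pyGetD _J 0 []).length
  pvLoopA _J m n (PySem.List.pyRange 0 (n : Int) 1) (List.replicate n 0) 0 ((n : Int) - 1)

-- ===== PORT B =====
-- 'min(_J[j][:m])' (the sort key of job j)
def pvKeyB (J : List (List Int)) (m : Nat) (j : Int) : Int :=
  (PySem.List.min? (PySem.List.slice (PySem.List.pyGetD J j []) none (some (m : Int)))
    (fun x => x)).getD 0

def JohnsonFLM_alt (_J : List (List Int)) : List Int :=
  let m := (PySem.List.pyGetD _J 0 []).length
  let order := PySem.List.sorted (PySem.List.pyRange 0 (_J.length : Int) 1) (pvKeyB _J m) false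
  let fb := order.foldl (fun (fb : List Int × List Int) j =>
    if PySem.List.pyGetD (PySem.List.pyGetD _J j []) 0 0 <
        PySem.List.pyGetD (PySem.List.pyGetD _J j []) ((m : Int) - 1) 0 then
      (fb.1 ++ [j], fb.2)
    else
      (fb.1, fb.2 ++ [j])) ([], [])
  fb.1 ++ fb.2.reverse

-- ===== PRECONDITION & SPEC =====
-- Pre_ is exactly where the Python A returns: a nonempty job list, at least one machine,
-- and every row at least m = len(_J[0]) long (else A raises IndexError/TypeError/ValueError).
def Pre_JohnsonFLM (_J : List (List Int)) : Prop :=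
  _J ≠ [] ∧ 1 ≤ (_J.headD []).length ∧ ∀ row ∈ _J, (_J.headD []).length ≤ row.length

instance (_J : List (List Int)) : Decidable (Pre_JohnsonFLM _J) := by
  unfold Pre_JohnsonFLM; infer_instance

def pvWitness_JohnsonFLM : List (List Int) := [[2, 1], [3, 0], [1, 5]]

def Spec_JohnsonFLM (_J : List (List Int)) (out : List Int) : Prop := out = JohnsonFLM_alt _J
instance (_J : List (List Int)) (out : List Int) : Decidable (Spec_JohnsonFLM _J out) := by
  unfold Spec_JohnsonFLM; infer_instance

-- ===== CLAIM (what is proved, stated in full; the proofs are below) =====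
def Claim_equal_JohnsonFLM : Prop :=
  ∀ (_J : List (List Int)), Dom_JohnsonFLM _J → Pre_JohnsonFLM _J →
    Spec_JohnsonFLM _J (JohnsonFLM _J)

-- ===== LEMMAS AND PROOFS =====

def pvStep (key : Int → Int) (acc : Option Int) (x : Int) : Option Int :=
  match acc with
  | none => some x
  | some m => if key x < key m then some x else some m

theorem pvStep_none (key : Int → Int) (x : Int) : pvStep key none x = some x := rfl
theorem pvStep_some (key : Int → Int) (m x : Int) :
    pvStep key (some m) x = if key x < key m then some x else some m := rfl

theorem pvMin?_eq_foldl (key : Int → Int) (xs : List Int) :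
    PySem.List.min? xs key = xs.foldl (pvStep key) none := by
  unfold PySem.List.min?
  congr 1
  funext acc x
  cases acc <;> rfl

theorem pvMinAux (key : Int → Int) (t : List Int) : ∀ (a : Int),
    t.foldl (pvStep key) (some a)
    = match t.foldl (pvStep key) none with
      | none => some a
      | some mt => if key mt < key a then some mt else some a := by
  induction t with
  | nil => intro a; rfl
  | cons x t ih =>
    intro a
    simp only [List.foldl_cons, pvStep_none, pvStep_some]
    by_cases hxa : key x < key a
    · rw [if_pos hxa]
      simp only [ih x]
      rcases List.foldl (pvStep key) none t with _ | mt
      · simp [hxa]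
      · by_cases h2 : key mt < key x
        · simp [h2, lt_trans h2 hxa]
        · simp [h2, hxa]
    · rw [if_neg hxa]
      simp only [ih a, ih x]
      rcases List.foldl (pvStep key) none t with _ | mt
      · simp [hxa]
      · by_cases h2 : key mt < key x
        · simp [h2]
        · have h3 : ¬ key mt < key a := by omega
          simp [h2, hxa, h3]

theorem pvMin?_cons (key : Int → Int) (x : Int) (t : List Int) :
    PySem.List.min? (x :: t) key =
      match PySem.List.min? t key with
      | none => some x
      | some mt => if key mt < key x then some mt else some x := by
  rw [pvMin?_eq_foldl, pvMin?_eq_foldl, List.foldl_cons, pvStep_none, pvMinAux]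

theorem pvMin?_first (key : Int → Int) (N : List Int) :
    ∀ (j : Int), N.Pairwise (· < ·) → PySem.List.min? N key = some j →
    ∀ y ∈ N, key y = key j → j ≤ y := by
  induction N with
  | nil => intro j _ _ y hy; exact absurd hy (by simp)
  | cons x t ih =>
    intro j hp hm y hy hk
    rw [pvMin?_cons] at hm
    rcases hmt : PySem.List.min? t key with _ | mt <;> rw [hmt] at hm
    · have hm' : (some x : Option Int) = some j := hm
      injection hm' with hmj
      subst hmj
      have ht : t = [] := (PySem.List.min?_eq_none_iff t key).mp hmt
      subst ht
      rcases List.mem_cons.mp hy with rfl | hy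
      · exact le_rfl
      · simp at hy
    · have hm' : (if key mt < key x then some mt else some x) = some j := hm
      by_cases h2 : key mt < key x
      · rw [if_pos h2] at hm'
        injection hm' with hmj
        subst hmj
        rcases List.mem_cons.mp hy with rfl | hy
        · omega
        · exact ih _ hp.of_cons hmt y hy hk
      · rw [if_neg h2] at hm'
        injection hm' with hmj
        subst hmj
        rcases List.mem_cons.mp hy with rfl | hy
        · exact le_rfl
        · exact le_of_lt (List.rel_of_pairwise_cons hp hy)


theorem pvFoldlMin_of_le (t : List Int) : ∀ (a b : Int), a ≤ b →
    t.foldl min a = min a (t.foldl min b) := by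
  induction t with
  | nil => intro a b h; simp; omega
  | cons y t ih =>
    intro a b h
    simp only [List.foldl_cons]
    rw [ih (min a y) (min b y) (by omega)]
    have hx := (PySem.List.foldl_min_le t (min b y)).1
    omega

theorem pvInnerSome (j : Int) (t : List Int) : ∀ (v : Int) (jc : Option Int),
    t.foldl (fun (st2 : Option Int × Option Int) e =>
      if pvLtInf e st2.1 = true then (some e, some j) else st2) (some v, jc)
    = (some (t.foldl min v), if t.foldl min v < v then some j else jc) := by
  induction t with
  | nil =>
    intro v jc
    simp [List.foldl_nil]
  | cons y t ih =>
    intro v jc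
    simp only [List.foldl_cons]
    by_cases hyv : y < v
    · rw [show (if pvLtInf y ((some v, jc) : Option Int × Option Int).1 = true
          then ((some y, some j) : Option Int × Option Int) else (some v, jc)) = (some y, some j) from by
        simp [pvLtInf, hyv]]
      rw [ih y (some j)]
      have h1 : min v y = y := by omega
      have h2 := (PySem.List.foldl_min_le t y).1
      simp only [h1, ite_self]
      rw [if_pos (show t.foldl min y < v from by omega)]
    · rw [show (if pvLtInf y ((some v, jc) : Option Int × Option Int).1 = true
          then ((some y, some j) : Option Int × Option Int) else (some v, jc)) = (some v, jc) from by
        simp [pvLtInf]; omega]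
      rw [ih v jc]
      have h1 : min v y = v := by omega
      simp only [List.foldl_cons, h1]

theorem pvInnerNone (j : Int) (x : Int) (t : List Int) (jc : Option Int) :
    (x :: t).foldl (fun (st2 : Option Int × Option Int) e =>
      if pvLtInf e st2.1 = true then (some e, some j) else st2) (none, jc)
    = (some (t.foldl min x), some j) := by
  simp only [List.foldl_cons]
  rw [show (if pvLtInf x ((none, jc) : Option Int × Option Int).1 = true
      then ((some x, some j) : Option Int × Option Int) else (none, jc)) = (some x, some j) from by
    simp [pvLtInf]]
  rw [pvInnerSome j t x (some j)]
  simp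

-- range-indexed scan of the first m entries = fold over row.take m
theorem pvRangeFold (row : List Int) (m : Nat) (hm : m ≤ row.length)
    (g : (Option Int × Option Int) → Int → (Option Int × Option Int))
    (st : Option Int × Option Int) :
    (PySem.List.pyRange 0 (m : Int) 1).foldl (fun st2 i => g st2 (PySem.List.pyGetD row i 0)) st
    = (row.take m).foldl g st := by
  have hlen : (row.take m).length = m := List.length_take_of_le hm
  have hcong : ∀ (st2 : Option Int × Option Int), ∀ i ∈ PySem.List.pyRange 0 (m : Int) 1,
      g st2 (PySem.List.pyGetD row i 0) = g st2 (PySem.List.pyGetD (row.take m) i 0) := by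
    intro st2 i hi
    rcases PySem.List.mem_pyRange_one.mp hi with ⟨h0, hiu⟩
    rw [PySem.List.pyGetD_of_nonneg _ _ h0, PySem.List.pyGetD_of_nonneg _ _ h0]
    have hit : i.toNat < m := by omega
    congr 1
    rw [List.getD_eq_getElem?_getD, List.getD_eq_getElem?_getD, List.getElem?_take_of_lt hit]
  rw [PySem.List.foldl_congr_mem _ _ _ _ hcong]
  rw [show ((m : Int)) = ((row.take m).length : Int) from by rw [hlen]]
  exact PySem.List.foldl_pyRange_zero_pyGetD' (row.take m) 0 g st

def pvRowOk (J : List (List Int)) (m : Nat) (j : Int) : Prop :=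
  1 ≤ m ∧ m ≤ (PySem.List.pyGetD J j []).length

theorem pvKeyB_eq (J : List (List Int)) (m : Nat) (j : Int) (x : Int) (t : List Int)
    (hxt : (PySem.List.pyGetD J j []).take m = x :: t) :
    pvKeyB J m j = t.foldl min x := by
  unfold pvKeyB
  rw [PySem.List.slice_to _ (by positivity), Int.toNat_natCast, hxt, PySem.List.min?_id_cons]
  rfl

theorem pvFoldlMin_cons (x v : Int) (t : List Int) :
    (x :: t).foldl min v = min v (t.foldl min x) := by
  simp only [List.foldl_cons]
  rcases le_total v x with h | h
  · rw [min_eq_left h, pvFoldlMin_of_le t v x h]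
  · rw [min_eq_right h]
    have := (PySem.List.foldl_min_le t x).1
    omega

theorem pvTakeCons (J : List (List Int)) (m : Nat) (j : Int) (hok : pvRowOk J m j) :
    ∃ x t, (PySem.List.pyGetD J j []).take m = x :: t := by
  obtain ⟨hm1, hm2⟩ := hok
  have : ((PySem.List.pyGetD J j []).take m).length = m := List.length_take_of_le hm2
  rcases hc : (PySem.List.pyGetD J j []).take m with _ | ⟨x, t⟩
  · rw [hc] at this; simp at this; omega
  · exact ⟨x, t, rfl⟩

theorem pvRowEffect_none (J : List (List Int)) (m : Nat) (j : Int) (jc : Option Int)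
    (hok : pvRowOk J m j) :
    (PySem.List.pyRange 0 (m : Int) 1).foldl (fun st2 i =>
      if pvLtInf (PySem.List.pyGetD (PySem.List.pyGetD J j []) i 0) st2.1 = true then
        (some (PySem.List.pyGetD (PySem.List.pyGetD J j []) i 0), some j)
      else st2) (none, jc) = (some (pvKeyB J m j), some j) := by
  have h := pvRangeFold (PySem.List.pyGetD J j []) m hok.2
    (fun st2 e => if pvLtInf e st2.1 = true then (some e, some j) else st2) (none, jc)
  refine Eq.trans h ?_
  obtain ⟨x, t, hxt⟩ := pvTakeCons J m j hok
  rw [hxt, pvKeyB_eq J m j x t hxt]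
  exact pvInnerNone j x t jc

theorem pvRowEffect_some (J : List (List Int)) (m : Nat) (j : Int) (v : Int) (jc : Option Int)
    (hok : pvRowOk J m j) :
    (PySem.List.pyRange 0 (m : Int) 1).foldl (fun st2 i =>
      if pvLtInf (PySem.List.pyGetD (PySem.List.pyGetD J j []) i 0) st2.1 = true then
        (some (PySem.List.pyGetD (PySem.List.pyGetD J j []) i 0), some j)
      else st2) (some v, jc) =
    if pvKeyB J m j < v then (some (pvKeyB J m j), some j) else (some v, jc) := by
  have h := pvRangeFold (PySem.List.pyGetD J j []) m hok.2
    (fun st2 e => if pvLtInf e st2.1 = true then (some e, some j) else st2) (some v, jc)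
  refine Eq.trans h ?_
  obtain ⟨x, t, hxt⟩ := pvTakeCons J m j hok
  rw [hxt, pvKeyB_eq J m j x t hxt]
  rw [pvInnerSome j (x :: t) v jc, pvFoldlMin_cons]
  have hK := (PySem.List.foldl_min_le t x).1
  by_cases hkv : t.foldl min x < v
  · have : min v (t.foldl min x) = t.foldl min x := by omega
    rw [this, if_pos hkv, if_pos hkv]
  · have : min v (t.foldl min x) = v := by omega
    rw [this, if_neg hkv, if_neg (by omega : ¬ v < v)]

theorem pvScanAux (J : List (List Int)) (m : Nat) : ∀ (N : List Int) (st : Option Int × Option Int),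
    (st = (none, none) ∨ ∃ jc, st = (some (pvKeyB J m jc), some jc)) →
    (∀ j ∈ N, pvRowOk J m j) →
    (N.foldl (fun st j =>
      (PySem.List.pyRange 0 (m : Int) 1).foldl (fun st2 i =>
        if pvLtInf (PySem.List.pyGetD (PySem.List.pyGetD J j []) i 0) st2.1 = true then
          (some (PySem.List.pyGetD (PySem.List.pyGetD J j []) i 0), some j)
        else st2) st) st).2
    = N.foldl (pvStep (pvKeyB J m)) st.2 := by
  intro N
  induction N with
  | nil => intro st _ _; rfl
  | cons j N ih =>
    intro st hinv hok
    simp only [List.foldl_cons]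
    rcases hinv with rfl | ⟨jc, rfl⟩
    · rw [pvRowEffect_none J m j none (hok j (by simp))]
      rw [ih (some (pvKeyB J m j), some j) (Or.inr ⟨j, rfl⟩) (fun y hy => hok y (by simp [hy]))]
      rfl
    · rw [pvRowEffect_some J m j (pvKeyB J m jc) (some jc) (hok j (by simp))]
      rw [show ((some (pvKeyB J m jc), some jc) : Option Int × Option Int).2 = some jc from rfl,
        pvStep_some]
      by_cases hlt : pvKeyB J m j < pvKeyB J m jc
      · rw [if_pos hlt, if_pos hlt]
        exact ih (some (pvKeyB J m j), some j) (Or.inr ⟨j, rfl⟩) (fun y hy => hok y (by simp [hy]))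
      · rw [if_neg hlt, if_neg hlt]
        exact ih _ (Or.inr ⟨jc, rfl⟩) (fun y hy => hok y (by simp [hy]))

theorem pvScanA_eq (J : List (List Int)) (m : Nat) (N : List Int)
    (hok : ∀ j ∈ N, pvRowOk J m j) :
    (pvScanA J m N).2 = PySem.List.min? N (pvKeyB J m) := by
  rw [pvMin?_eq_foldl]
  exact pvScanAux J m N (none, none) (Or.inl rfl) hok

def pvR (J : List (List Int)) (m : Nat) (a b : Int) : Prop :=
  pvKeyB J m a < pvKeyB J m b ∨ (pvKeyB J m a = pvKeyB J m b ∧ a < b)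

theorem pvInsertBy_pairwise (J : List (List Int)) (m : Nat) (x : Int) :
    ∀ (acc : List Int), acc.Pairwise (pvR J m) → (∀ y ∈ acc, y < x) →
    (PySem.List.insertBy (fun a b => decide (pvKeyB J m a < pvKeyB J m b)) x acc).Pairwise
      (pvR J m) := by
  intro acc
  induction acc with
  | nil => intro _ _; simp [show PySem.List.insertBy (fun a b => decide (pvKeyB J m a < pvKeyB J m b)) x [] = [x] from rfl]
  | cons y ys ih =>
    intro hp hlt
    rw [show PySem.List.insertBy (fun a b => decide (pvKeyB J m a < pvKeyB J m b)) x (y :: ys)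
      = if decide (pvKeyB J m x < pvKeyB J m y) then x :: y :: ys
        else y :: PySem.List.insertBy (fun a b => decide (pvKeyB J m a < pvKeyB J m b)) x ys from rfl]
    by_cases hxy : pvKeyB J m x < pvKeyB J m y
    · rw [if_pos (by simpa using hxy)]
      refine List.Pairwise.cons ?_ hp
      intro z hz
      rcases List.mem_cons.mp hz with rfl | hz
      · exact Or.inl hxy
      · rcases List.pairwise_cons.mp hp with ⟨hy, _⟩
        have := hy z hz
        rcases this with h | ⟨h1, h2⟩
        · exact Or.inl (lt_trans hxy h)
        · exact Or.inl (by omega)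
    · rw [if_neg (by simpa using hxy)]
      rcases List.pairwise_cons.mp hp with ⟨hy, hys⟩
      refine List.Pairwise.cons ?_ (ih hys (fun z hz => hlt z (by simp [hz])))
      intro z hz
      rcases (PySem.List.mem_insertBy _ x z ys).mp hz with rfl | hz
      · rcases lt_or_eq_of_le (not_lt.mp hxy) with h | h
        · exact Or.inl h
        · exact Or.inr ⟨h, hlt y (by simp)⟩
      · exact hy z hz

theorem pvSortedAux (J : List (List Int)) (m : Nat) :
    ∀ (N acc : List Int), acc.Pairwise (pvR J m) → (∀ y ∈ acc, ∀ z ∈ N, y < z) →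
    N.Pairwise (· < ·) →
    (N.foldl (fun acc x =>
      PySem.List.insertBy (fun a b => decide (pvKeyB J m a < pvKeyB J m b)) x acc) acc).Pairwise
      (pvR J m) := by
  intro N
  induction N with
  | nil => intro acc hacc _ _; exact hacc
  | cons x N ih =>
    intro acc hacc hlt hp
    simp only [List.foldl_cons]
    refine ih _ (pvInsertBy_pairwise J m x acc hacc (fun y hy => hlt y hy x (by simp))) ?_ hp.of_cons
    intro y hy z hz
    rcases (PySem.List.mem_insertBy _ x y acc).mp hy with rfl | hy
    · exact List.rel_of_pairwise_cons hp hz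
    · exact hlt y hy z (by simp [hz])

theorem pvSorted_pairwise_r (J : List (List Int)) (m : Nat) (N : List Int)
    (hp : N.Pairwise (· < ·)) :
    (PySem.List.sorted N (pvKeyB J m) false).Pairwise (pvR J m) := by
  rw [PySem.List.sorted_eq_foldl_insertBy]
  exact pvSortedAux J m N [] (by simp) (by simp) hp

def pvExtract (J : List (List Int)) (m : Nat) : Nat → List Int → List Int
  | 0, _ => []
  | fuel+1, N =>
    match PySem.List.min? N (pvKeyB J m) with
    | none => []
    | some j => j :: pvExtract J m fuel (N.erase j)

theorem pvExtract_subset (J : List (List Int)) (m : Nat) :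
    ∀ (fuel : Nat) (N : List Int), ∀ y ∈ pvExtract J m fuel N, y ∈ N := by
  intro fuel
  induction fuel with
  | zero => intro N y hy; simp [pvExtract] at hy
  | succ f ih =>
    intro N y hy
    unfold pvExtract at hy
    rcases hm : PySem.List.min? N (pvKeyB J m) with _ | j
    · rw [hm] at hy; simp at hy
    · rw [hm] at hy
      rcases List.mem_cons.mp hy with rfl | hy
      · exact PySem.List.min?_mem hm
      · exact (List.erase_sublist).mem (ih (N.erase j) y hy)

theorem pvExtract_perm (J : List (List Int)) (m : Nat) :
    ∀ (fuel : Nat) (N : List Int), fuel = N.length → (pvExtract J m fuel N).Perm N := by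
  intro fuel
  induction fuel with
  | zero =>
    intro N h
    rw [show N = [] from List.length_eq_zero_iff.mp h.symm]
    rfl
  | succ f ih =>
    intro N h
    unfold pvExtract
    rcases hm : PySem.List.min? N (pvKeyB J m) with _ | j
    · rw [(PySem.List.min?_eq_none_iff N _).mp hm] at h; simp at h
    · have hj : j ∈ N := PySem.List.min?_mem hm
      have hlen : f = (N.erase j).length := by
        rw [List.length_erase_of_mem hj]; omega
      exact ((ih (N.erase j) hlen).cons j).trans (List.perm_cons_erase hj).symm

theorem pvExtract_pairwise (J : List (List Int)) (m : Nat)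
    (hfirst : ∀ (N : List Int) (j : Int), N.Pairwise (· < ·) →
      PySem.List.min? N (pvKeyB J m) = some j → ∀ y ∈ N, pvKeyB J m y = pvKeyB J m j → j ≤ y) :
    ∀ (fuel : Nat) (N : List Int), N.Pairwise (· < ·) →
    (pvExtract J m fuel N).Pairwise (pvR J m) := by
  intro fuel
  induction fuel with
  | zero => intro N _; simp [pvExtract]
  | succ f ih =>
    intro N hp
    unfold pvExtract
    rcases hm : PySem.List.min? N (pvKeyB J m) with _ | j
    · simp
    · have hj : j ∈ N := PySem.List.min?_mem hm
      have hpe : (N.erase j).Pairwise (· < ·) := hp.sublist List.erase_sublist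
      refine List.pairwise_cons.mpr ⟨?_, ih (N.erase j) hpe⟩
      intro y hy
      have hyN : y ∈ N.erase j := pvExtract_subset J m f (N.erase j) y hy
      have hyj : y ≠ j ∧ y ∈ N := (hp.nodup.mem_erase_iff).mp hyN
      have hle : pvKeyB J m j ≤ pvKeyB J m y := PySem.List.min?_isMin hm y hyj.2
      rcases lt_or_eq_of_le hle with h | h
      · exact Or.inl h
      · have := hfirst N j hp hm y hyj.2 h.symm
        exact Or.inr ⟨h, lt_of_le_of_ne this (Ne.symm hyj.1)⟩

theorem pvExtract_eq_sorted (J : List (List Int)) (m : Nat)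
    (hfirst : ∀ (N : List Int) (j : Int), N.Pairwise (· < ·) →
      PySem.List.min? N (pvKeyB J m) = some j → ∀ y ∈ N, pvKeyB J m y = pvKeyB J m j → j ≤ y)
    (N : List Int) (hp : N.Pairwise (· < ·)) :
    pvExtract J m N.length N = PySem.List.sorted N (pvKeyB J m) false := by
  refine List.Perm.eq_of_pairwise ?_ (pvExtract_pairwise J m hfirst N.length N hp)
    (pvSorted_pairwise_r J m N hp)
    ((pvExtract_perm J m N.length N rfl).trans (PySem.List.sorted_perm N _ false).symm)
  intro a b _ _ hab hba
  unfold pvR at hab hba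
  omega


def pvTB (J : List (List Int)) (m : Nat) (j : Int) : Bool :=
  decide (PySem.List.pyGetD (PySem.List.pyGetD J j []) 0 0 <
    PySem.List.pyGetD (PySem.List.pyGetD J j []) ((m : Int) - 1) 0)

theorem pvSetOob {a : Type} : forall (l : List a) (n : Nat) (v : a), l.length <= n -> l.set n v = l := by
  intro l
  induction l with
  | nil => intro n v _; rfl
  | cons x xs ih =>
    intro n v h
    cases n with
    | zero => simp at h
    | succ n =>
      show x :: xs.set n v = x :: xs
      rw [ih n v (by simp at h; omega)]

theorem pvPairFold (J : List (List Int)) (m : Nat) :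
    forall (seq f b : List Int),
    seq.foldl (fun (fb : List Int × List Int) j =>
      if PySem.List.pyGetD (PySem.List.pyGetD J j []) 0 0 <
          PySem.List.pyGetD (PySem.List.pyGetD J j []) ((m : Int) - 1) 0 then
        (fb.1 ++ [j], fb.2)
      else
        (fb.1, fb.2 ++ [j])) (f, b) =
    (f ++ seq.filter (pvTB J m), b ++ seq.filter (fun j => ! pvTB J m j)) := by
  intro seq
  induction seq with
  | nil => intro f b; simp
  | cons j seq ih =>
    intro f b
    simp only [List.foldl_cons]
    by_cases hc : PySem.List.pyGetD (PySem.List.pyGetD J j []) 0 0 <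
        PySem.List.pyGetD (PySem.List.pyGetD J j []) ((m : Int) - 1) 0
    · rw [if_pos hc, ih (f ++ [j]) b]
      simp [pvTB, hc, List.filter_cons]
    · rw [if_neg hc, ih f (b ++ [j])]
      simp [pvTB, hc, List.filter_cons]

theorem pvLoopA_eq (J : List (List Int)) (m : Nat) :
    forall (fuel : Nat) (N pi : List Int) (l k : Int),
    fuel = N.length ->
    N.Pairwise (· < ·) -> (forall j, j ∈ N -> pvRowOk J m j) ->
    0 <= l -> l + (N.length : Int) = k + 1 -> k < (pi.length : Int) ->
    pvLoopA J m fuel N pi l k =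
      pi.take l.toNat ++ (pvExtract J m fuel N).filter (pvTB J m) ++
        ((pvExtract J m fuel N).filter (fun j => ! pvTB J m j)).reverse ++
        pi.drop (k + 1).toNat := by
  intro fuel
  induction fuel with
  | zero =>
    intro N pi l k hf _ _ hl hlk hk
    have hN : N = [] := List.length_eq_zero_iff.mp hf.symm
    subst hN
    simp only [pvLoopA, pvExtract, List.filter_nil, List.reverse_nil, List.append_nil,
      List.nil_append]
    have hlk2 : l = k + 1 := by simp at hlk; omega
    rw [hlk2]
    exact (List.take_append_drop (k+1).toNat pi).symm
  | succ f ih =>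
    intro N pi l k hf hp hok hl hlk hk
    have hne : N ≠ [] := by
      intro h; rw [h] at hf; simp at hf
    have hmin := pvScanA_eq J m N hok
    rcases hj : PySem.List.min? N (pvKeyB J m) with _ | j
    · exact absurd ((PySem.List.min?_eq_none_iff N _).mp hj) hne
    have hjN : j ∈ N := PySem.List.min?_mem hj
    have hsc : (pvScanA J m N).2 = some j := by rw [hmin, hj]
    have herase : (PySem.List.remove? N j).getD N = N.erase j := by
      rw [PySem.List.remove?_eq_some_erase N j hjN]; rfl
    have hext : pvExtract J m (f+1) N = j :: pvExtract J m f (N.erase j) := by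
      show (match PySem.List.min? N (pvKeyB J m) with
        | none => ([] : List Int)
        | some j => j :: pvExtract J m f (N.erase j)) = _
      rw [hj]
    have hlenN : N.length = f + 1 := hf.symm
    have hlene : (N.erase j).length = f := by
      rw [List.length_erase_of_mem hjN, hlenN]
      omega
    have hpe : (N.erase j).Pairwise (· < ·) := hp.sublist List.erase_sublist
    have hoke : forall y, y ∈ N.erase j -> pvRowOk J m y :=
      fun y hy => hok y (List.mem_of_mem_erase hy)
    have hlk3 : l <= k := by rw [hlenN] at hlk; push_cast at hlk; omega
    have hk0 : 0 <= k := by omega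
    have hlpi : l.toNat < pi.length := by omega
    have hkpi : k.toNat < pi.length := by omega
    show (if N = [] then pi else
      match (pvScanA J m N).2 with
      | none => pi
      | some js =>
        if PySem.List.pyGetD (PySem.List.pyGetD J js []) 0 0 <
            PySem.List.pyGetD (PySem.List.pyGetD J js []) ((m : Int) - 1) 0 then
          pvLoopA J m f ((PySem.List.remove? N js).getD N) (PySem.List.pySetD pi l js) (l+1) k
        else
          pvLoopA J m f ((PySem.List.remove? N js).getD N) (PySem.List.pySetD pi k js) l (k-1)) = _
    rw [if_neg hne, hsc]
    show (if PySem.List.pyGetD (PySem.List.pyGetD J j []) 0 0 <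
            PySem.List.pyGetD (PySem.List.pyGetD J j []) ((m : Int) - 1) 0 then
          pvLoopA J m f ((PySem.List.remove? N j).getD N) (PySem.List.pySetD pi l j) (l+1) k
        else
          pvLoopA J m f ((PySem.List.remove? N j).getD N) (PySem.List.pySetD pi k j) l (k-1)) = _
    rw [herase]
    by_cases hc : PySem.List.pyGetD (PySem.List.pyGetD J j []) 0 0 <
        PySem.List.pyGetD (PySem.List.pyGetD J j []) ((m : Int) - 1) 0
    · rw [if_pos hc, PySem.List.pySetD_of_nonneg pi j hl]
      rw [ih (N.erase j) (pi.set l.toNat j) (l+1) k hlene.symm hpe hoke (by omega)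
        (by rw [hlene]; push_cast; rw [hlenN] at hlk; push_cast at hlk; omega)
        (by rw [List.length_set]; exact hk)]
      rw [hext]
      have hfil1 : (j :: pvExtract J m f (N.erase j)).filter (pvTB J m)
          = j :: (pvExtract J m f (N.erase j)).filter (pvTB J m) := by
        simp [List.filter_cons, pvTB, hc]
      have hfil2 : (j :: pvExtract J m f (N.erase j)).filter (fun y => ! pvTB J m y)
          = (pvExtract J m f (N.erase j)).filter (fun y => ! pvTB J m y) := by
        simp [List.filter_cons, pvTB, hc]
      rw [hfil1, hfil2]
      have h1 : (l+1).toNat = l.toNat + 1 := by omega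
      have h2 : (pi.set l.toNat j).take (l.toNat + 1) = pi.take l.toNat ++ [j] := by
        rw [List.take_succ, List.take_set]
        rw [pvSetOob _ _ _ (by rw [List.length_take]; omega)]
        rw [List.getElem?_eq_getElem (by rw [List.length_set]; exact hlpi)]
        rw [List.getElem_set_self]
        rfl
      have h3 : (pi.set l.toNat j).drop (k+1).toNat = pi.drop (k+1).toNat := by
        rw [List.drop_set, if_pos (by omega)]
      rw [h1, h2, h3]
      simp [List.append_assoc]
    · rw [if_neg hc, PySem.List.pySetD_of_nonneg pi j hk0]
      rw [ih (N.erase j) (pi.set k.toNat j) l (k-1) hlene.symm hpe hoke hl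
        (by rw [hlene]; push_cast; rw [hlenN] at hlk; push_cast at hlk; omega)
        (by rw [List.length_set]; omega)]
      rw [hext]
      have hfil1 : (j :: pvExtract J m f (N.erase j)).filter (pvTB J m)
          = (pvExtract J m f (N.erase j)).filter (pvTB J m) := by
        simp [List.filter_cons, pvTB, hc]
      have hfil2 : (j :: pvExtract J m f (N.erase j)).filter (fun y => ! pvTB J m y)
          = j :: (pvExtract J m f (N.erase j)).filter (fun y => ! pvTB J m y) := by
        simp [List.filter_cons, pvTB, hc]
      rw [hfil1, hfil2]
      have h1 : (k - 1 + 1) = k := by omega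
      have h2 : (pi.set k.toNat j).take l.toNat = pi.take l.toNat := by
        rw [List.take_set]
        exact pvSetOob _ _ _ (by rw [List.length_take]; omega)
      have h3 : (pi.set k.toNat j).drop k.toNat = j :: pi.drop (k+1).toNat := by
        rw [List.drop_eq_getElem_cons (by rw [List.length_set]; exact hkpi)]
        rw [List.getElem_set_self]
        rw [List.drop_set, if_pos (by omega),
          show (k + 1).toNat = k.toNat + 1 from by omega]
      rw [h1, h2, h3]
      simp [List.append_assoc]

-- ===== VERDICT (by name: the statement is the Claim_ definition above) =====
theorem JohnsonFLM_spec : Claim_equal_JohnsonFLM := by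
  intro J _ hpre
  obtain ⟨hne, hm1, hrows⟩ := hpre
  unfold Spec_JohnsonFLM
  have hhead : PySem.List.pyGetD J 0 [] = J.headD [] := by
    rcases J with _ | ⟨r, rest⟩
    · exact absurd rfl hne
    · rw [PySem.List.pyGetD_of_nonneg _ _ (by omega)]; rfl
  have hn1 : 1 <= J.length := by
    rcases J with _ | _
    · exact absurd rfl hne
    · simp
  have hNlen : (PySem.List.pyRange 0 (J.length : Int) 1).length = J.length := by
    rw [PySem.List.length_pyRange_one]; omega
  have hokN : forall j, j ∈ PySem.List.pyRange 0 (J.length : Int) 1 ->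
      pvRowOk J ((PySem.List.pyGetD J 0 []).length) j := by
    intro j hjmem
    rcases PySem.List.mem_pyRange_one.mp hjmem with ⟨h0, hu⟩
    constructor
    · rw [hhead]; omega
    · rw [PySem.List.pyGetD_of_nonneg _ _ h0]
      have hjl : j.toNat < J.length := by omega
      rw [List.getD_eq_getElem _ _ hjl, hhead]
      exact hrows _ (List.getElem_mem hjl)
  have hA : JohnsonFLM J =
      (pvExtract J ((PySem.List.pyGetD J 0 []).length) J.length
          (PySem.List.pyRange 0 (J.length : Int) 1)).filter
        (pvTB J ((PySem.List.pyGetD J 0 []).length)) ++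
      ((pvExtract J ((PySem.List.pyGetD J 0 []).length) J.length
          (PySem.List.pyRange 0 (J.length : Int) 1)).filter
        (fun y => ! pvTB J ((PySem.List.pyGetD J 0 []).length) y)).reverse := by
    show pvLoopA J ((PySem.List.pyGetD J 0 []).length) J.length
        (PySem.List.pyRange 0 (J.length : Int) 1) (List.replicate J.length (0 : Int)) 0
        ((J.length : Int) - 1) = _
    rw [pvLoopA_eq J ((PySem.List.pyGetD J 0 []).length) J.length
      (PySem.List.pyRange 0 (J.length : Int) 1) (List.replicate J.length (0 : Int)) 0
      ((J.length : Int) - 1) hNlen.symm (PySem.List.pairwise_lt_pyRange_one 0 (J.length : Int))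
      hokN (by omega) (by rw [hNlen]; omega) (by rw [List.length_replicate]; omega)]
    rw [show ((0 : Int)).toNat = 0 from rfl]
    rw [show ((J.length : Int) - 1 + 1) = (J.length : Int) from by ring]
    rw [show ((J.length : Int)).toNat = J.length from by omega]
    rw [List.take_zero, List.nil_append]
    rw [show (List.replicate J.length (0 : Int)).drop J.length = [] from by simp]
    rw [List.append_nil]
  have hB : JohnsonFLM_alt J =
      ((PySem.List.sorted (PySem.List.pyRange 0 (J.length : Int) 1)
          (pvKeyB J ((PySem.List.pyGetD J 0 []).length)) false).filter
        (pvTB J ((PySem.List.pyGetD J 0 []).length))) ++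
      ((PySem.List.sorted (PySem.List.pyRange 0 (J.length : Int) 1)
          (pvKeyB J ((PySem.List.pyGetD J 0 []).length)) false).filter
        (fun y => ! pvTB J ((PySem.List.pyGetD J 0 []).length) y)).reverse := by
    show ((PySem.List.sorted (PySem.List.pyRange 0 (J.length : Int) 1)
        (pvKeyB J ((PySem.List.pyGetD J 0 []).length)) false).foldl _ ([], [])).1 ++
      ((PySem.List.sorted (PySem.List.pyRange 0 (J.length : Int) 1)
        (pvKeyB J ((PySem.List.pyGetD J 0 []).length)) false).foldl _ ([], [])).2.reverse = _
    rw [pvPairFold]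
    simp
  have hES := pvExtract_eq_sorted J ((PySem.List.pyGetD J 0 []).length)
    (fun N j hp hm => pvMin?_first (pvKeyB J ((PySem.List.pyGetD J 0 []).length)) N j hp hm)
    (PySem.List.pyRange 0 (J.length : Int) 1)
    (PySem.List.pairwise_lt_pyRange_one 0 (J.length : Int))
  rw [hNlen] at hES
  rw [hA, hB, hES]
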